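-- pv_equiv track=rewrite | github.com/raold/second-brain | app/bulk_validation_safety.py | _detect_inappropriate_content
-- ===== SOURCE A (Python) =====
-- def _detect_inappropriate_content(text: str) -> bool:
--     """Detect inappropriate content (simplified)."""
--     # This would typically use a more sophisticated content filtering system
--     inappropriate_words = [
--         "hate", "violence", "illegal", "fraud", "scam",
--         "phishing", "malware", "virus", "exploit"
--     ]
--
--     text_lower = text.lower()
--     for word in inappropriate_words:
--         if word in text_lower:
--             return True
--
--     return False
-- ===== SOURCE B (Python) =====
-- def _detect_inappropriate_content(text: str) -> bool:
--     """Detect inappropriate content: one left-to-right scan over the lowered text,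
--     checking at each position whether any keyword starts there."""
--     keywords = ("hate", "violence", "illegal", "fraud", "scam",
--                 "phishing", "malware", "virus", "exploit")
--     t = text.lower()
--     for i in range(len(t)):
--         for w in keywords:
--             if t.startswith(w, i):
--                 return True
--     return False
-- ===== Notes on version B (the rewrite author's own statement) =====
-- stated objective: alternative
-- what changed: B traverses the lowered text once position by position and checks at each index whether any keyword starts there (startswith), instead of A's keyword-major loop doing nine independent substring scans.
import Mathlib
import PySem

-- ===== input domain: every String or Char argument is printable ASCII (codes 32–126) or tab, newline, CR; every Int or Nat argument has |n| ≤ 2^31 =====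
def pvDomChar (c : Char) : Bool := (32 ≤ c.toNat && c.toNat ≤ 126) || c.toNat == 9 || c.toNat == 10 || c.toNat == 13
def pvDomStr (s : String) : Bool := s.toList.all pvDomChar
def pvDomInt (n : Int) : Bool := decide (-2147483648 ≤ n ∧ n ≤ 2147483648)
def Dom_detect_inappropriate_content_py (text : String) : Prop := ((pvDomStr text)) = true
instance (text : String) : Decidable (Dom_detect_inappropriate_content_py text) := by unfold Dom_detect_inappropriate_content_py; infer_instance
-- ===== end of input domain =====

-- ===== PORT A =====
-- A: lower the text, then for each keyword test substring containment ('word in text_lower').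
def detect_inappropriate_content_py (text : String) : Bool :=
  let inappropriate_words : List String :=
    ["hate", "violence", "illegal", "fraud", "scam", "phishing", "malware", "virus", "exploit"]
  let text_lower := PySem.Str.lower text
  inappropriate_words.any (fun word => PySem.Str.isIn word text_lower)

-- ===== PORT B =====
-- B: one left-to-right scan over the lowered text; at each position test whether any
-- keyword starts there (the 'for i in range(len(t))' loop becomes suffix recursion).
def pvKeywordsChars : List (List Char) :=
  (["hate", "violence", "illegal", "fraud", "scam", "phishing", "malware", "virus", "exploit"] : List String).map String.toList

def pvScanPositions (ws : List (List Char)) : List Char → Bool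
  | [] => false
  | c :: rest =>
      (ws.any (fun w => PySem.Chars.startswith (c :: rest) w)) || pvScanPositions ws rest

def detect_inappropriate_content_py_alt (text : String) : Bool :=
  pvScanPositions pvKeywordsChars (PySem.Chars.lower text.toList)

-- ===== PRECONDITION & SPEC =====
def Spec_detect_inappropriate_content_py (text : String) (out : Bool) : Prop := out = detect_inappropriate_content_py_alt text
instance (text : String) (out : Bool) : Decidable (Spec_detect_inappropriate_content_py text out) := by unfold Spec_detect_inappropriate_content_py; infer_instance

-- ===== CLAIM (what is proved, stated in full; the proofs are below) =====
def Claim_equal_detect_inappropriate_content_py : Prop := ∀ (text : String), Dom_detect_inappropriate_content_py text → Spec_detect_inappropriate_content_py text (detect_inappropriate_content_py text)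

-- ===== LEMMAS AND PROOFS =====
-- The position-major scan finds some keyword iff some keyword is an infix (for nonempty keywords).
theorem pvScanPositions_eq_any_isIn (ws : List (List Char)) (hne : ∀ w ∈ ws, w ≠ []) :
    ∀ cs : List Char, pvScanPositions ws cs = ws.any (fun w => PySem.Chars.isIn w cs) := by
  intro cs
  induction cs with
  | nil =>
      simp only [pvScanPositions]
      symm
      simp only [List.any_eq_false]
      intro w hw
      rw [show ¬PySem.Chars.isIn w [] = true ↔ ¬ w <:+: ([] : List Char) from
        not_congr (PySem.Chars.isIn_iff_infix w [])]
      simpa using hne w hw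
  | cons c rest ih =>
      simp only [pvScanPositions, ih]
      rw [Bool.eq_iff_iff]
      simp only [Bool.or_eq_true, List.any_eq_true, PySem.Chars.isIn_iff_infix,
        PySem.Chars.startswith_iff, List.infix_cons_iff]
      constructor
      · rintro (⟨w, hw, h⟩ | ⟨w, hw, h⟩)
        · exact ⟨w, hw, Or.inl h⟩
        · exact ⟨w, hw, Or.inr h⟩
      · rintro ⟨w, hw, h | h⟩
        · exact Or.inl ⟨w, hw, h⟩
        · exact Or.inr ⟨w, hw, h⟩

-- ===== VERDICT (by name: the statement is the Claim_ definition above) =====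
theorem detect_inappropriate_content_py_spec : Claim_equal_detect_inappropriate_content_py := by
  intro text _
  unfold Spec_detect_inappropriate_content_py detect_inappropriate_content_py detect_inappropriate_content_py_alt
  rw [pvScanPositions_eq_any_isIn pvKeywordsChars (by decide)]
  simp [pvKeywordsChars, PySem.Str.isIn, PySem.Str.lower]
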